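-- pv_equiv track=rewrite | github.com/Matt115A/protein-interaction-coevolution | scripts/generate_heatmaps.py | find_alignment_region
-- ===== SOURCE A (Python) =====
-- def find_alignment_region(msa_seq, target):
--     N, tlen = len(msa_seq), len(target)
--     for i in range(N):
--         cnt, j = 0, i
--         while j < N and cnt < tlen:
--             if msa_seq[j] != '-': cnt += 1
--             j += 1
--         if cnt < tlen:
--             break
--         if msa_seq[i:j].replace('-', '') == target:
--             return i, j - 1
--     raise ValueError("Could not find concatenated seqA+seqB in MSA")
-- ===== SOURCE B (Python) =====
-- def find_alignment_region(msa_seq, target):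
--     # Strip the gaps once (C-level), locate target in the ungapped string with one
--     # str.find, then map the two match endpoints back to MSA columns by walking
--     # only the gap columns (str.find per gap), shifting the endpoints right.
--     u = msa_seq.replace('-', '')
--     tlen = len(target)
--     if tlen == 0:
--         if msa_seq:
--             return 0, -1
--         raise ValueError("Could not find concatenated seqA+seqB in MSA")
--     k = u.find(target)
--     if k == -1:
--         raise ValueError("Could not find concatenated seqA+seqB in MSA")
--     start = k - 1          # column of residue k-1 (-1 when k == 0)
--     end = k + tlen - 1     # column of residue k+tlen-1
--     g = msa_seq.find('-')
--     while g != -1 and g <= end: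
--         if g <= start:
--             start += 1
--         end += 1
--         g = msa_seq.find('-', g + 1)
--     return start + 1, end
-- ===== Notes on version B (the rewrite author's own statement) =====
-- stated objective: faster
-- what changed: Instead of re-scanning and re-ungapping a window of the MSA for every start position i, B strips the gaps once while recording each kept character's original column, finds the target in the ungapped string with a single str.find, and maps the match endpoints back through the recorded columns.
import Mathlib
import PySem

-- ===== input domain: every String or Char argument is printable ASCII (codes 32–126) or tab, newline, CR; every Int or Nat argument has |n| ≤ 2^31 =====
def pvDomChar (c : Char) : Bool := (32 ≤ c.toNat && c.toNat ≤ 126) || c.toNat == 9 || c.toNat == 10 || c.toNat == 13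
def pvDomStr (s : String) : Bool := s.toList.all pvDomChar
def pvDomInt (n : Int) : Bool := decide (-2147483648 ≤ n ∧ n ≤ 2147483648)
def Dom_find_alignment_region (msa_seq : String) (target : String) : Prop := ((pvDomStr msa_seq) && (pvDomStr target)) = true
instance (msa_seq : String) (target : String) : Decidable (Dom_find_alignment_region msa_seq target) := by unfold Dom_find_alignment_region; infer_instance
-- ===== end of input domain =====

-- B replaces A's per-start window rescan by one gap-stripping pass plus a single
-- substring search on the ungapped string, mapping the match back through the
-- recorded columns (objective: faster).  Return-value equivalence only; on the
-- inputs where the Pythons raise ValueError (excluded by Pre_) both ports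
-- return the sentinel (-1, -1).

-- shared helper: Python's test `c != '-'` (a non-gap character)
def pvNG (c : Char) : Bool := c != '-'

-- ===== PORT A =====
-- inner `while j < N and cnt < tlen` loop, state (cnt, j)
def pvInnerA (s : List Char) (tlen cnt j : Nat) : Nat × Nat :=
  if h : j < s.length ∧ cnt < tlen then
    pvInnerA s tlen (if pvNG (s[j]'h.1) then cnt + 1 else cnt) (j + 1)
  else (cnt, j)
termination_by s.length - j
decreasing_by omega

-- outer `for i in range(N)` loop; `break` falls through to the raise.
-- msa_seq[i:j] with 0 ≤ i ≤ j is exactly (drop i).take (j-i) (PySem.List.slice_natCast);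
-- .replace('-', '') removes every '-', i.e. filters pvNG — exact.
-- The ValueError exits (break, and range exhausted) return the sentinel (-1, -1); Pre_ excludes them.
def pvOuterA (s t : List Char) (i : Nat) : Int × Int :=
  if h : i < s.length then
    let cj := pvInnerA s t.length 0 i
    if cj.1 < t.length then (-1, -1)
    else if ((s.drop i).take (cj.2 - i)).filter pvNG = t then ((i : Int), (cj.2 : Int) - 1)
    else pvOuterA s t (i + 1)
  else (-1, -1)
termination_by s.length - i
decreasing_by omega

def find_alignment_region (msa_seq : String) (target : String) : Int × Int :=
  pvOuterA msa_seq.toList target.toList 0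

-- ===== PORT B =====
-- the Source B while loop over gap columns; fuel (s.length + 1) only makes the
-- recursion structural: each str.find('-', g+1) returns a strictly larger gap
-- column < s.length, so at most s.length iterations happen (Python needs no fuel)
def pvGapWalk (s : List Char) (fuel : Nat) (start endv g : Int) : Int × Int :=
  match fuel with
  | 0 => (start + 1, endv)
  | fuel + 1 =>
    if g ≠ -1 ∧ g ≤ endv then
      pvGapWalk s fuel (if g ≤ start then start + 1 else start) (endv + 1)
        (PySem.Chars.findFrom s ['-'] (g + 1))
    else (start + 1, endv)

-- literal transliteration of Source B: replace/find/find-from are the PySem primitives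
-- (Python-exact); the two `raise ValueError` points return the sentinel (-1, -1),
-- excluded by Pre_.
def find_alignment_region_alt (msa_seq : String) (target : String) : Int × Int :=
  let s := msa_seq.toList
  let t := target.toList
  let u := PySem.Chars.replace s ['-'] []
  if t.length = 0 then
    if s.length ≠ 0 then (0, -1) else (-1, -1)
  else
    let k := PySem.Chars.find u t
    if k = -1 then (-1, -1)
    else pvGapWalk s (s.length + 1) (k - 1) (k + t.length - 1) (PySem.Chars.find s ['-'])

-- ===== PRECONDITION & SPEC =====
-- Pre_ excludes exactly the inputs on which A raises ValueError: the target does not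
-- occur in the gap-stripped MSA, or both strings are empty.
def Pre_find_alignment_region (msa_seq : String) (target : String) : Prop :=
  target.toList <:+: (msa_seq.toList.filter pvNG) ∧ (msa_seq.toList ≠ [] ∨ target.toList ≠ [])
instance (msa_seq : String) (target : String) : Decidable (Pre_find_alignment_region msa_seq target) := by
  unfold Pre_find_alignment_region; infer_instance
def pvWitness_find_alignment_region : String × String := ("A-B", "AB")

def Spec_find_alignment_region (msa_seq : String) (target : String) (out : Int × Int) : Prop := out = find_alignment_region_alt msa_seq target
instance (msa_seq : String) (target : String) (out : Int × Int) : Decidable (Spec_find_alignment_region msa_seq target out) := by unfold Spec_find_alignment_region; infer_instance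

-- ===== CLAIM (what is proved, stated in full; the proofs are below) =====
def Claim_equal_find_alignment_region : Prop := ∀ (msa_seq : String) (target : String), Dom_find_alignment_region msa_seq target → Pre_find_alignment_region msa_seq target → Spec_find_alignment_region msa_seq target (find_alignment_region msa_seq target)

-- ===== LEMMAS AND PROOFS =====

-- length of the shortest prefix of l containing m non-gap characters (l.length if fewer)
def pvScanLen : List Char → Nat → Nat
  | _, 0 => 0
  | [], _ + 1 => 0
  | c :: cs, m + 1 => 1 + pvScanLen cs (if pvNG c then m else m + 1)

lemma pvScanLen_nil (m : Nat) : pvScanLen [] m = 0 := by cases m <;> rfl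

lemma pvScanLen_zero (l : List Char) : pvScanLen l 0 = 0 := by cases l <;> rfl

lemma pvScanLen_cons (c : Char) (cs : List Char) (n : Nat) (hn : n ≠ 0) :
    pvScanLen (c :: cs) n = 1 + pvScanLen cs (if pvNG c then n - 1 else n) := by
  cases n with
  | zero => exact absurd rfl hn
  | succ m => cases h : pvNG c <;> simp [pvScanLen, h]

-- characterisation of A's inner while loop
lemma pvInnerA_eq (s : List Char) (m : Nat) :
    ∀ d cnt j, j ≤ s.length → s.length - j = d →
    pvInnerA s m cnt j =
      (cnt + min (m - cnt) ((s.drop j).countP pvNG), j + pvScanLen (s.drop j) (m - cnt)) := by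
  intro d
  induction d with
  | zero =>
    intro cnt j hj hd
    have : j = s.length := by omega
    subst this
    rw [pvInnerA]
    simp [pvScanLen_nil]
  | succ d ih =>
    intro cnt j hj hd
    have hjlt : j < s.length := by omega
    rw [pvInnerA]
    by_cases hc : cnt < m
    · rw [dif_pos ⟨hjlt, hc⟩]
      have hdrop : s.drop j = s[j] :: s.drop (j + 1) := List.drop_eq_getElem_cons hjlt
      rw [ih _ (j + 1) (by omega) (by omega), hdrop,
        pvScanLen_cons _ _ _ (by omega)]
      simp only [List.countP_cons, Prod.mk.injEq]
      cases hg : pvNG s[j]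
      · simp only [Bool.false_eq_true, if_false]
        exact ⟨by omega, by omega⟩
      · simp only [if_true]
        refine ⟨by omega, ?_⟩
        rw [show m - cnt - 1 = m - (cnt + 1) from by omega]
        omega
    · rw [dif_neg (by omega)]
      have : m - cnt = 0 := by omega
      simp [this, pvScanLen]

-- the scanned window, ungapped, is the next m non-gaps
lemma pvTake_scanLen_filter : ∀ (l : List Char) (m : Nat),
    (l.take (pvScanLen l m)).filter pvNG = (l.filter pvNG).take m := by
  intro l
  induction l with
  | nil => intro m; simp [pvScanLen_nil]
  | cons c cs ih =>
    intro m
    cases m with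
    | zero => simp [pvScanLen]
    | succ m =>
      cases h : pvNG c <;>
        simp [pvScanLen, h, Nat.one_add, List.filter_cons, ih]

-- the ungapped tail from column i is the ungapped string minus its first k(i) characters
lemma pvFilter_drop : ∀ (i : Nat) (s : List Char),
    (s.drop i).filter pvNG = (s.filter pvNG).drop ((s.take i).countP pvNG) := by
  intro i
  induction i with
  | zero => intro s; simp
  | succ i ih =>
    intro s
    cases s with
    | nil => simp
    | cons c cs =>
      cases h : pvNG c <;> simp [List.filter_cons, List.countP_cons, h, ih cs]

-- additivity of pvScanLen across a split at column i
lemma pvScanLen_add : ∀ (i : Nat) (s : List Char) (r : Nat), 1 ≤ r → i ≤ s.length →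
    pvScanLen s ((s.take i).countP pvNG + r) = i + pvScanLen (s.drop i) r := by
  intro i
  induction i with
  | zero => intro s r _ _; simp
  | succ i ih =>
    intro s r hr hi
    cases s with
    | nil => simp at hi
    | cons c cs =>
      have hlen : i ≤ cs.length := by simpa using hi
      rw [List.take_succ_cons, List.countP_cons, List.drop_succ_cons]
      cases h : pvNG c
      · simp only [Bool.false_eq_true, if_false, Nat.add_zero]
        rw [pvScanLen_cons _ _ _ (by omega), if_neg (by simp [h]), ih cs r hr hlen]
        omega
      · simp only [if_true]
        rw [pvScanLen_cons _ _ _ (by omega), if_pos h,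
          show (cs.take i).countP pvNG + 1 + r - 1 = (cs.take i).countP pvNG + r from by omega,
          ih cs r hr hlen]
        omega

-- every k' below k(i) is k(i') for some i' < i
lemma pvCountP_take_surj : ∀ (i : Nat) (s : List Char) (k' : Nat), i ≤ s.length →
    k' < (s.take i).countP pvNG → ∃ i' < i, (s.take i').countP pvNG = k' := by
  intro i
  induction i with
  | zero => intro s k' _ h; simp at h
  | succ i ih =>
    intro s k' hi hk
    have hil : i < s.length := by omega
    have hstep : (s.take (i + 1)).countP pvNG
        = (s.take i).countP pvNG + (if pvNG s[i] then 1 else 0) := by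
      rw [List.take_add_one, List.countP_append]
      simp [List.getElem?_eq_getElem hil, List.countP_cons]
    by_cases h : k' < (s.take i).countP pvNG
    · obtain ⟨i', hi', he⟩ := ih s k' (by omega) h
      exact ⟨i', by omega, he⟩
    · refine ⟨i, by omega, ?_⟩
      rw [hstep] at hk
      split at hk <;> omega

-- value of Python's str.find at the first matching offset
lemma pvFind_go_eq (sub : List Char) (hne : sub ≠ []) :
    ∀ (s : List Char) (k j : Nat), sub <+: s.drop j → (∀ j' < j, ¬ sub <+: s.drop j') →
    PySem.Chars.find.go sub s k = (k : Int) + (j : Int) := by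
  intro s
  induction s with
  | nil =>
    intro k j hp _
    rw [List.drop_nil] at hp
    exact absurd (List.prefix_nil.mp hp) hne
  | cons c cs ih =>
    intro k j hp hmin
    by_cases h0 : sub <+: (c :: cs)
    · have hj : j = 0 := by
        by_contra hj
        exact hmin 0 (by omega) (by simpa using h0)
      subst hj
      simp [PySem.Chars.find.go, List.isPrefixOf_iff_prefix, h0]
    · cases j with
      | zero => simp at hp; exact absurd hp h0
      | succ j =>
        rw [List.drop_succ_cons] at hp
        have := ih (k + 1) j hp (fun j' hj' => by
          have := hmin (j' + 1) (by omega)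
          rwa [List.drop_succ_cons] at this)
        rw [PySem.Chars.find.go]
        rw [if_neg (by simpa [List.isPrefixOf_iff_prefix] using h0)]
        rw [this]
        push_cast
        ring

lemma pvFind_eq (u sub : List Char) (hne : sub ≠ []) (j : Nat)
    (hp : sub <+: u.drop j) (hmin : ∀ j' < j, ¬ sub <+: u.drop j') :
    PySem.Chars.find u sub = (j : Int) := by
  have := pvFind_go_eq sub hne u 0 j hp hmin
  simpa [PySem.Chars.find] using this


-- a prefix of the MSA gap-count is monotone in its length
lemma pvCountP_take_mono (s : List Char) (a b : Nat) (hab : a ≤ b) :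
    (s.take a).countP pvNG ≤ (s.take b).countP pvNG := by
  have he : s.take a = (s.take b).take a := by rw [List.take_take]; congr 1; omega
  rw [he]
  exact (List.take_sublist _ _).countP_le

-- one step of the take-count
lemma pvCountP_take_step (s : List Char) (i : Nat) (hi : i < s.length) :
    (s.take (i + 1)).countP pvNG
      = (s.take i).countP pvNG + (if pvNG s[i] then 1 else 0) := by
  rw [List.take_add_one, List.countP_append]
  simp [List.getElem?_eq_getElem hi, List.countP_cons]

-- str.replace(s, '-', '') is the gap filter
lemma pvReplaceGo : ∀ (fuel : Nat) (l acc : List Char), l.length ≤ fuel →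
    PySem.Chars.replace.go ['-'] [] fuel l acc = acc.reverse ++ l.filter pvNG := by
  intro fuel
  induction fuel with
  | zero =>
    intro l acc h
    have hl : l = [] := List.length_eq_zero_iff.mp (by omega)
    subst hl
    simp [PySem.Chars.replace.go]
  | succ fuel ih =>
    intro l acc h
    cases l with
    | nil => simp [PySem.Chars.replace.go]
    | cons c cs =>
      by_cases hc : c = '-'
      · subst hc
        simp only [PySem.Chars.replace.go]
        rw [if_pos (by simp [List.isPrefixOf_iff_prefix])]
        rw [show List.drop ['-'].length ('-' :: cs) = cs from rfl]
        simp only [List.reverse_nil, List.nil_append]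
        rw [ih cs acc (by simpa using h)]
        simp [List.filter_cons, pvNG]
      · simp only [PySem.Chars.replace.go]
        rw [if_neg (by simp [List.isPrefixOf_iff_prefix, List.cons_prefix_cons]; tauto)]
        rw [ih cs (c :: acc) (by simpa using h)]
        simp [List.filter_cons, pvNG, hc]

lemma pvReplace_eq (s : List Char) : PySem.Chars.replace s ['-'] [] = s.filter pvNG := by
  rw [PySem.Chars.replace, if_neg (by simp), pvReplaceGo s.length s [] le_rfl]
  simp

-- the first gap column at or after p
def pvNextGap (s : List Char) (p : Nat) : Option Nat :=
  if h : p < s.length then (if pvNG (s[p]'h) then pvNextGap s (p + 1) else some p) else none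
termination_by s.length - p

def pvNextGapI (s : List Char) (p : Nat) : Int :=
  match pvNextGap s p with
  | none => -1
  | some j => (j : Int)

lemma pvNextGap_spec (s : List Char) : ∀ d p, s.length - p = d →
    (pvNextGap s p = none → ∀ j (hj : j < s.length), p ≤ j → pvNG s[j] = true) ∧
    (∀ gq, pvNextGap s p = some gq → p ≤ gq ∧ ∃ (h : gq < s.length), pvNG (s[gq]'h) = false ∧
       ∀ j (hj : j < s.length), p ≤ j → j < gq → pvNG s[j] = true) := by
  intro d
  induction d with
  | zero =>
    intro p hd
    rw [pvNextGap, dif_neg (by omega)]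
    refine ⟨fun _ j hj hpj => absurd hj (by omega), fun gq h => by cases h⟩
  | succ d ih =>
    intro p hd
    have hplt : p < s.length := by omega
    rw [pvNextGap, dif_pos hplt]
    obtain ⟨ihn, ihs⟩ := ih (p + 1) (by omega)
    cases hc : pvNG (s[p]'hplt) with
    | true =>
      rw [if_pos rfl]
      refine ⟨fun hn j hj hpj => ?_, fun gq hs => ?_⟩
      · rcases Nat.eq_or_lt_of_le hpj with h | h
        · subst h; exact hc
        · exact ihn hn j hj (by omega)
      · obtain ⟨h1, h2, h3, h4⟩ := ihs gq hs
        exact ⟨by omega, h2, h3, fun j hj hpj hjq => by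
          rcases Nat.eq_or_lt_of_le hpj with h | h
          · subst h; exact hc
          · exact h4 j hj (by omega) hjq⟩
    | false =>
      rw [if_neg (by simp)]
      refine ⟨(fun hn => by cases hn), fun gq hs => ?_⟩
      have : gq = p := by injection hs; omega
      subst this
      exact ⟨le_rfl, hplt, hc, fun j hj hpj hjq => absurd hjq (by omega)⟩

-- ['-'] starts l.drop q exactly when column q holds '-'
lemma pvPrefix_dash (l : List Char) (q : Nat) :
    (['-'] <+: l.drop q) ↔ l[q]? = some '-' := by
  have hq0 : l[q]? = (l.drop q)[0]? := by simp [List.getElem?_drop]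
  rw [hq0]
  cases h : l.drop q with
  | nil => simp
  | cons c cs => simp [List.cons_prefix_cons, eq_comm]

-- str.find(s, '-', p) is the first gap column at or after p
lemma pvFindFrom_gap (s : List Char) (p : Nat) (hp : p ≤ s.length) :
    PySem.Chars.findFrom s ['-'] (p : Int) = pvNextGapI s p := by
  have hst : ¬ ((p : Int) < 0) := by omega
  have hen : ¬ (((s.length : Nat) : Int) < (p : Int)) := by omega
  simp only [PySem.Chars.findFrom]
  rw [if_neg hst, if_neg hen, Int.toNat_natCast, Int.toNat_natCast, List.take_length]
  cases hng : pvNextGap s p with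
  | none =>
    have hfind : PySem.Chars.find (s.drop p) ['-'] = -1 := by
      rw [PySem.Chars.find_eq_neg_one_iff]
      intro hinf
      obtain ⟨j, hj⟩ := (PySem.Chars.exists_prefix_drop_iff_isIn _ _).mpr
        ((PySem.Chars.isIn_iff_infix _ _).mpr hinf)
      rw [pvPrefix_dash, List.getElem?_drop] at hj
      have hjl : p + j < s.length := (List.getElem?_eq_some_iff.mp hj).1
      have := (pvNextGap_spec s (s.length - p) p rfl).1 hng (p + j) hjl (by omega)
      rw [(List.getElem?_eq_some_iff.mp hj).2] at this
      simp [pvNG] at this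
    rw [hfind, if_pos rfl, pvNextGapI, hng]
  | some gq =>
    obtain ⟨hpg, hlt, hgap, hmin⟩ := (pvNextGap_spec s (s.length - p) p rfl).2 gq hng
    have hdash : s[gq]'hlt = '-' := by
      have := hgap
      simp [pvNG] at this
      exact this
    have hfind : PySem.Chars.find (s.drop p) ['-'] = ((gq - p : Nat) : Int) := by
      apply pvFind_eq _ _ (by simp) (gq - p)
      · rw [pvPrefix_dash, List.getElem?_drop, show p + (gq - p) = gq from by omega,
          List.getElem?_eq_getElem hlt, hdash]
      · intro j' hj'
        rw [pvPrefix_dash, List.getElem?_drop]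
        intro hcon
        have hjl : p + j' < s.length := (List.getElem?_eq_some_iff.mp hcon).1
        have := hmin (p + j') hjl (by omega) (by omega)
        rw [(List.getElem?_eq_some_iff.mp hcon).2] at this
        simp [pvNG] at this
    rw [hfind, if_neg (by omega)]
    simp only [pvNextGapI, hng]
    omega

-- str.find(s, '-') is the first gap column
lemma pvFind_gap (s : List Char) : PySem.Chars.find s ['-'] = pvNextGapI s 0 := by
  cases hng : pvNextGap s 0 with
  | none =>
    rw [pvNextGapI, hng, PySem.Chars.find_eq_neg_one_iff]
    intro hinf
    obtain ⟨j, hj⟩ := (PySem.Chars.exists_prefix_drop_iff_isIn _ _).mpr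
      ((PySem.Chars.isIn_iff_infix _ _).mpr hinf)
    rw [pvPrefix_dash] at hj
    have hjl : j < s.length := (List.getElem?_eq_some_iff.mp hj).1
    have := (pvNextGap_spec s (s.length - 0) 0 rfl).1 hng j hjl (by omega)
    rw [(List.getElem?_eq_some_iff.mp hj).2] at this
    simp [pvNG] at this
  | some gq =>
    obtain ⟨hpg, hlt, hgap, hmin⟩ := (pvNextGap_spec s (s.length - 0) 0 rfl).2 gq hng
    rw [pvNextGapI, hng]
    apply pvFind_eq _ _ (by simp) gq
    · rw [pvPrefix_dash, List.getElem?_eq_getElem hlt]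
      have hdash : s[gq]'hlt = '-' := by
        have := hgap
        simp [pvNG] at this
        exact this
      rw [hdash]
    · intro j' hj'
      rw [pvPrefix_dash]
      intro hcon
      have hjl : j' < s.length := (List.getElem?_eq_some_iff.mp hcon).1
      have := hmin j' hjl (by omega) hj'
      rw [(List.getElem?_eq_some_iff.mp hcon).2] at this
      simp [pvNG] at this

-- the gap count below column p
def pvGB (s : List Char) (p : Nat) : Nat := (s.take p).countP (fun c => c == '-')

lemma pvCount_split (l : List Char) : l.countP pvNG + l.countP (fun c => c == '-') = l.length := by
  induction l with
  | nil => rfl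
  | cons c cs ih =>
    by_cases hc : c = '-' <;> simp [List.countP_cons, pvNG, hc] <;> omega

-- a gap-free column interval adds its full length to the residue count
lemma pvCount_take_interval (s : List Char) (p q : Nat) (hpq : p ≤ q) (hq : q ≤ s.length)
    (hclean : ∀ j (hj : j < s.length), p ≤ j → j < q → pvNG s[j] = true) :
    (s.take q).countP pvNG = (s.take p).countP pvNG + (q - p) := by
  induction q with
  | zero =>
    have : p = 0 := by omega
    subst this; simp
  | succ q ihq =>
    rcases Nat.eq_or_lt_of_le hpq with h | h
    · subst h; simp
    · have hq1 : q < s.length := by omega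
      rw [pvCountP_take_step s q hq1,
        ihq (by omega) (by omega) (fun j hj h1 h2 => hclean j hj h1 (by omega)),
        hclean q hq1 (by omega) (by omega), if_pos rfl]
      omega

-- a non-gap column is exactly the endpoint of the shortest prefix holding its residues
lemma pvScan_of_ng (s : List Char) (b : Nat) (hb : b < s.length) (hng : pvNG s[b] = true) :
    pvScanLen s ((s.take (b + 1)).countP pvNG) = b + 1 := by
  have hstep := pvCountP_take_step s b hb
  rw [hng, if_pos rfl] at hstep
  have h1 := pvScanLen_add b s 1 le_rfl (le_of_lt hb)
  rw [List.drop_eq_getElem_cons hb, pvScanLen_cons _ _ _ one_ne_zero, if_pos hng,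
    show (1 : Nat) - 1 = 0 from rfl, pvScanLen_zero] at h1
  rw [hstep]
  omega

-- a running endpoint whose residue index is settled and that precedes every
-- remaining gap has reached its final column
lemma pvFreeze (s : List Char) (p : Nat) (x : Int) (ex : Nat)
    (hp : p ≤ s.length) (hx : x = (ex : Int) + (pvGB s p : Int))
    (hpx : (p : Int) ≤ x) (hex : ex < s.countP pvNG)
    (hclause : ∀ j (hj : j < s.length), p ≤ j → pvNG s[j] = false → x < (j : Int)) :
    x = (pvScanLen s (ex + 1) : Int) - 1 := by
  unfold pvGB at hx
  have hx0 : (0 : Int) ≤ x := le_trans (by omega) hpx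
  have hsplit_s := pvCount_split s
  have hsplit_p := pvCount_split (s.take p)
  have hlen_p : (s.take p).length = p := by rw [List.length_take]; omega
  have hsub : (s.take p).countP (fun c => c == '-') ≤ s.countP (fun c => c == '-') :=
    (List.take_sublist _ _).countP_le
  have hqn : x.toNat < s.length := by omega
  set q := x.toNat with hqdef
  have hxq : x = (q : Int) := by omega
  have hclean : ∀ j (hj : j < s.length), p ≤ j → j < q + 1 → pvNG s[j] = true := by
    intro j hj hpj hjq
    by_contra hgap
    rw [Bool.not_eq_true] at hgap
    have := hclause j hj hpj hgap
    omega
  have hcnt := pvCount_take_interval s p (q + 1) (by omega) (by omega) hclean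
  have hngq : pvNG (s[q]'hqn) = true := hclean q hqn (by omega) (by omega)
  have hcnt2 : (s.take (q + 1)).countP pvNG = ex + 1 := by omega
  have hfin := pvScan_of_ng s q hqn hngq
  rw [hcnt2] at hfin
  omega

-- full correctness of the gap walk: it turns residue indices into MSA columns
lemma pvGapWalk_spec (s : List Char) :
    ∀ fuel p (a b : Int) (eb : Nat) (fa : Int),
      p ≤ s.length → s.length - p < fuel →
      b = (eb : Int) + (pvGB s p : Int) → (p : Int) ≤ b → eb < s.countP pvNG →
      a ≤ b →
      ((∀ j (hj : j < s.length), p ≤ j → pvNG s[j] = false → a < (j : Int)) ∧ fa = a ∨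
       (∃ ea : Nat, a = (ea : Int) + (pvGB s p : Int) ∧ (p : Int) ≤ a ∧ ea < s.countP pvNG ∧
          fa = (pvScanLen s (ea + 1) : Int) - 1)) →
      pvGapWalk s fuel a b (pvNextGapI s p) = (fa + 1, (pvScanLen s (eb + 1) : Int) - 1) := by
  intro fuel
  induction fuel with
  | zero => intro p a b eb fa hp hfuel; exact absurd hfuel (by omega)
  | succ fuel ih =>
    intro p a b eb fa hp hfuel hb hpb heb hab hA
    cases hng : pvNextGap s p with
    | none =>
      have hnone := (pvNextGap_spec s (s.length - p) p rfl).1 hng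
      have hclause : ∀ j (hj : j < s.length), p ≤ j → pvNG s[j] = false → b < (j : Int) := by
        intro j hj hpj hgap
        rw [hnone j hj hpj] at hgap
        cases hgap
      have hbfin := pvFreeze s p b eb hp hb hpb heb hclause
      have hafin : fa = a := by
        rcases hA with ⟨_, hfa⟩ | ⟨ea, hae, hpa, heaN, hfae⟩
        · exact hfa
        · rw [hfae, ← pvFreeze s p a ea hp hae hpa heaN
            (fun j hj hpj hgap => lt_of_le_of_lt hab (hclause j hj hpj hgap))]
      simp only [pvGapWalk, pvNextGapI, hng]
      rw [if_neg (by simp)]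
      rw [Prod.mk.injEq]
      exact ⟨by omega, by omega⟩
    | some gq =>
      obtain ⟨hpg, hgqlt, hgap, hmin⟩ := (pvNextGap_spec s (s.length - p) p rfl).2 gq hng
      simp only [pvNextGapI, hng]
      by_cases hgb : (gq : Int) ≤ b
      · -- this gap shifts the endpoints; continue after it
        simp only [pvGapWalk]
        rw [if_pos ⟨by omega, hgb⟩,
          show ((gq : Int) + 1) = (((gq + 1 : Nat)) : Int) from by push_cast; ring,
          pvFindFrom_gap s (gq + 1) (by omega)]
        have hGB : pvGB s (gq + 1) = pvGB s p + 1 := by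
          have hint := pvCount_take_interval s p gq hpg (by omega)
            (fun j hj h1 h2 => hmin j hj h1 h2)
          have hstep := pvCountP_take_step s gq hgqlt
          rw [hgap] at hstep
          simp only [Bool.false_eq_true, if_false, Nat.add_zero] at hstep
          have e1 := pvCount_split (s.take p)
          have e2 := pvCount_split (s.take (gq + 1))
          have l1 : (s.take p).length = p := by simp [hp]
          have l2 : (s.take (gq + 1)).length = gq + 1 := by simp; omega
          unfold pvGB
          omega
        refine ih (gq + 1) _ _ eb fa (by omega) (by omega) (by rw [hb, hGB]; push_cast; ring)
          (by omega) heb (by split <;> omega) ?_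
        by_cases hga : (gq : Int) ≤ a
        · rw [if_pos hga]
          rcases hA with ⟨hcl, _⟩ | ⟨ea, hae, hpa, heaN, hfae⟩
          · exact absurd (hcl gq hgqlt hpg hgap) (by omega)
          · exact Or.inr ⟨ea, by rw [hae, hGB]; push_cast; ring, by omega, heaN, hfae⟩
        · rw [if_neg hga]
          rcases hA with ⟨hcl, hfa⟩ | ⟨ea, hae, hpa, heaN, hfae⟩
          · refine Or.inl ⟨fun j hj hpj hgapj => ?_, hfa⟩
            have : gq ≤ j := by
              by_contra hlt
              push_neg at hlt
              rw [hmin j hj (by omega) hlt] at hgapj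
              cases hgapj
            omega
          · have haf := pvFreeze s p a ea hp hae hpa heaN (fun j hj hpj hgapj => by
              have : gq ≤ j := by
                by_contra hlt
                push_neg at hlt
                rw [hmin j hj (by omega) hlt] at hgapj
                cases hgapj
              omega)
            refine Or.inl ⟨fun j hj hpj hgapj => ?_, by omega⟩
            have : gq ≤ j := by
              by_contra hlt
              push_neg at hlt
              rw [hmin j hj (by omega) hlt] at hgapj
              cases hgapj
            omega
      · -- the next gap lies beyond the endpoint: both columns are final
        simp only [pvGapWalk]
        rw [if_neg (fun h => hgb h.2)]
        have hclause : ∀ j (hj : j < s.length), p ≤ j → pvNG s[j] = false → b < (j : Int) := by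
          intro j hj hpj hgapj
          have : gq ≤ j := by
            by_contra hlt
            push_neg at hlt
            rw [hmin j hj (by omega) hlt] at hgapj
            cases hgapj
          omega
        have hbfin := pvFreeze s p b eb hp hb hpb heb hclause
        have hafin : fa = a := by
          rcases hA with ⟨_, hfa⟩ | ⟨ea, hae, hpa, heaN, hfae⟩
          · exact hfa
          · rw [hfae, ← pvFreeze s p a ea hp hae hpa heaN
              (fun j hj hpj hgap => lt_of_le_of_lt hab (hclause j hj hpj hgap))]
        rw [Prod.mk.injEq]
        exact ⟨by omega, by omega⟩

-- B's core for a nonempty target, phrased on lists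
def pvAltRest (s t : List Char) : Int × Int :=
  let k := PySem.Chars.find (s.filter pvNG) t
  if k = -1 then (-1, -1)
  else pvGapWalk s (s.length + 1) (k - 1) (k + t.length - 1) (PySem.Chars.find s ['-'])

lemma pvAltRest_neg (s t : List Char)
    (h : ∀ j : Nat, ¬ t <+: (s.filter pvNG).drop j) : pvAltRest s t = (-1, -1) := by
  have hfind : PySem.Chars.find (s.filter pvNG) t = -1 := by
    rw [PySem.Chars.find_eq_neg_one_iff]
    intro hinf
    have : PySem.Chars.isIn t (s.filter pvNG) = true := (PySem.Chars.isIn_iff_infix _ _).mpr hinf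
    obtain ⟨j, hj⟩ := (PySem.Chars.exists_prefix_drop_iff_isIn _ _).mpr this
    exact h j hj
  simp [pvAltRest, hfind]

-- main loop equivalence: from any start i reached with no earlier match, A's loop
-- computes exactly B's answer
lemma pvOuter_main (s t : List Char) (hm : t ≠ []) :
    ∀ d i, i ≤ s.length → s.length - i = d →
    (∀ i' < i, ¬ t <+: (s.filter pvNG).drop ((s.take i').countP pvNG)) →
    pvOuterA s t i = pvAltRest s t := by
  have hkC : ∀ i ≤ s.length,
      (s.filter pvNG).length = (s.take i).countP pvNG + (s.drop i).countP pvNG := by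
    intro i _
    conv_lhs => rw [← List.take_append_drop i s]
    rw [List.filter_append, List.length_append,
      ← List.countP_eq_length_filter, ← List.countP_eq_length_filter]
  have hmpos : 1 ≤ t.length := List.length_pos_iff.mpr hm
  intro d
  induction d with
  | zero =>
    intro i hi hd inv
    have hie : i = s.length := by omega
    subst hie
    rw [pvOuterA, dif_neg (lt_irrefl _)]
    refine (pvAltRest_neg s t ?_).symm
    intro j hp
    by_cases hj : j < (s.take s.length).countP pvNG
    · obtain ⟨i', hi', he⟩ := pvCountP_take_surj s.length s j le_rfl hj
      exact inv i' hi' (he ▸ hp)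
    · have hjlen : (s.filter pvNG).length ≤ j := by
        have := hkC s.length le_rfl
        simp only [List.drop_length, List.countP_nil] at this
        omega
      rw [List.drop_eq_nil_of_le hjlen] at hp
      exact hm (List.prefix_nil.mp hp)
  | succ d ih =>
    intro i hi hd inv
    have hilt : i < s.length := by omega
    rw [pvOuterA, dif_pos hilt,
      pvInnerA_eq s t.length (s.length - i) 0 i (by omega) rfl]
    simp only [Nat.sub_zero, Nat.zero_add]
    by_cases hCm : (s.drop i).countP pvNG < t.length
    · -- `break`: fewer than tlen residues remain from column i; no match anywhere
      rw [if_pos (by omega)]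
      refine (pvAltRest_neg s t ?_).symm
      intro j hp
      by_cases hj : j < (s.take i).countP pvNG
      · obtain ⟨i', hi', he⟩ := pvCountP_take_surj i s j (by omega) hj
        exact inv i' hi' (he ▸ hp)
      · have h1 := hkC i (by omega)
        have h2 : ((s.filter pvNG).drop j).length < t.length := by
          rw [List.length_drop]; omega
        have := hp.length_le
        omega
    · have hmin : min t.length ((s.drop i).countP pvNG) = t.length := by omega
      rw [hmin, if_neg (lt_irrefl _)]
      have hslice : ((s.drop i).take (i + pvScanLen (s.drop i) t.length - i)).filter pvNG
          = ((s.filter pvNG).drop ((s.take i).countP pvNG)).take t.length := by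
        rw [show i + pvScanLen (s.drop i) t.length - i = pvScanLen (s.drop i) t.length
            from by omega,
          pvTake_scanLen_filter, pvFilter_drop]
      by_cases htest :
          ((s.filter pvNG).drop ((s.take i).countP pvNG)).take t.length = t
      · -- first match found: A returns here, and B's find lands exactly at k(i)
        rw [if_pos (by rw [hslice, htest])]
        have hpre : t <+: (s.filter pvNG).drop ((s.take i).countP pvNG) := by
          rw [← htest]; exact List.take_prefix _ _
        have hminimal : ∀ j' < (s.take i).countP pvNG,
            ¬ t <+: (s.filter pvNG).drop j' := by
          intro j' hj' hp
          obtain ⟨i', hi', he⟩ := pvCountP_take_surj i s j' (by omega) hj'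
          exact inv i' hi' (he ▸ hp)
        have hfind : PySem.Chars.find (s.filter pvNG) t = ((s.take i).countP pvNG : Int) :=
          pvFind_eq _ _ hm _ hpre hminimal
        have hcount : s.countP pvNG
            = (s.take i).countP pvNG + (s.drop i).countP pvNG := by
          rw [List.countP_eq_length_filter]; exact hkC i (by omega)
        have hscA : pvScanLen s ((s.take i).countP pvNG + t.length - 1 + 1)
            = i + pvScanLen (s.drop i) t.length := by
          rw [show (s.take i).countP pvNG + t.length - 1 + 1
              = (s.take i).countP pvNG + t.length from by omega,
            pvScanLen_add i s t.length hmpos (by omega)]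
        have hGB0 : pvGB s 0 = 0 := by simp [pvGB]
        rw [pvAltRest]
        simp only [hfind]
        rw [if_neg (by omega), pvFind_gap]
        by_cases hkz : (s.take i).countP pvNG = 0
        · -- k = 0 forces i = 0 (an earlier all-gap start would already have matched)
          have hi0 : i = 0 := by
            by_contra hne
            have hle : (s.take (i - 1)).countP pvNG = 0 := by
              have := pvCountP_take_mono s (i - 1) i (by omega)
              omega
            exact inv (i - 1) (by omega) (by rw [hle, ← hkz]; exact hpre)
          subst hi0
          rw [pvGapWalk_spec s (s.length + 1) 0
            (((s.take 0).countP pvNG : Int) - 1)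
            (((s.take 0).countP pvNG : Int) + (t.length : Int) - 1)
            ((s.take 0).countP pvNG + t.length - 1) (-1)
            (by omega) (by omega)
            (by rw [hGB0]; push_cast; omega)
            (by omega) (by omega) (by omega)
            (Or.inl ⟨(fun j hj hpj hgap => by omega), by omega⟩)]
          rw [Prod.mk.injEq]
          refine ⟨by omega, ?_⟩
          rw [hscA]
        · -- k > 0: column i-1 holds residue number k, so A's i is pos[k-1]+1
          have hipos : 0 < i := by
            by_contra hBot
            have : i = 0 := by omega
            subst this
            simp at hkz
          have hstep := pvCountP_take_step s (i - 1) (by omega)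
          rw [show i - 1 + 1 = i from by omega] at hstep
          have hknot : (s.take (i - 1)).countP pvNG ≠ (s.take i).countP pvNG := by
            intro he
            exact inv (i - 1) (by omega) (he ▸ hpre)
          have hng : pvNG (s[i - 1]'(by omega)) = true := by
            by_contra hq
            rw [Bool.not_eq_true] at hq
            rw [hq] at hstep
            simp at hstep
            omega
          rw [hng, if_pos rfl] at hstep
          have hscan : pvScanLen s ((s.take i).countP pvNG) = i := by
            have h1 := pvScanLen_add (i - 1) s 1 le_rfl (by omega)
            have hdropc : s.drop (i - 1) = s[i - 1] :: s.drop i := by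
              rw [List.drop_eq_getElem_cons (show i - 1 < s.length from by omega)]
              congr 2
              omega
            rw [hdropc, pvScanLen_cons _ _ _ (by omega), if_pos hng,
              show (1 : Nat) - 1 = 0 from rfl, pvScanLen_zero, ← hstep] at h1
            omega
          rw [pvGapWalk_spec s (s.length + 1) 0
            (((s.take i).countP pvNG : Int) - 1)
            (((s.take i).countP pvNG : Int) + (t.length : Int) - 1)
            ((s.take i).countP pvNG + t.length - 1)
            ((pvScanLen s ((s.take i).countP pvNG) : Int) - 1)
            (by omega) (by omega)
            (by rw [hGB0]; push_cast; omega)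
            (by omega) (by omega) (by omega)
            (Or.inr ⟨(s.take i).countP pvNG - 1,
              by rw [hGB0]; push_cast; omega,
              by omega,
              by omega,
              by rw [show (s.take i).countP pvNG - 1 + 1 = (s.take i).countP pvNG
                  from by omega]⟩)]
          rw [Prod.mk.injEq]
          refine ⟨by rw [hscan]; omega, ?_⟩
          rw [hscA]
      · -- no match at column i: step to i+1
        rw [if_neg (by rw [hslice]; exact htest)]
        refine ih (i + 1) (by omega) (by omega) ?_
        intro i' hi'
        by_cases hii : i' < i
        · exact inv i' hii
        · have : i' = i := by omega
          subst this
          intro hp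
          exact htest ((List.prefix_iff_eq_take.mp hp).symm)

-- the empty-target, nonempty-MSA case of A
lemma pvOuterA_nil (s : List Char) (hs : s ≠ []) : pvOuterA s [] 0 = (0, -1) := by
  have hlen : 0 < s.length := List.length_pos_iff.mpr hs
  rw [pvOuterA, dif_pos hlen]
  have h1 : pvInnerA s 0 0 0 = (0, 0) := by
    rw [pvInnerA, dif_neg (by simp)]
  simp [h1]

-- port B, for a nonempty target, is pvAltRest
lemma pvAlt_eq (msa_seq target : String) (ht : target.toList ≠ []) :
    find_alignment_region_alt msa_seq target = pvAltRest msa_seq.toList target.toList := by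
  simp only [find_alignment_region_alt, pvAltRest, pvReplace_eq]
  rw [if_neg (by simpa [List.length_eq_zero_iff] using ht)]

-- ===== VERDICT (by name: the statement is the Claim_ definition above) =====
theorem find_alignment_region_spec : Claim_equal_find_alignment_region := by
  intro msa_seq target _dom pre
  obtain ⟨hinf, hne⟩ := pre
  unfold Spec_find_alignment_region
  by_cases ht : target.toList = []
  · have hs : msa_seq.toList ≠ [] := by
      rcases hne with h | h
      · exact h
      · exact absurd ht h
    have hs2 : msa_seq ≠ "" := by
      intro h
      apply hs
      rw [h]
      rfl
    rw [find_alignment_region, ht, pvOuterA_nil msa_seq.toList hs]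
    simp [find_alignment_region_alt, ht, List.length_eq_zero_iff, hs2]
  · rw [find_alignment_region,
      pvOuter_main msa_seq.toList target.toList ht msa_seq.toList.length 0 (by omega)
        (by omega) (by intro i' h; exact absurd h (Nat.not_lt_zero _)),
      pvAlt_eq msa_seq target ht]
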